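-- pv_equiv track=rewrite | github.com/MaxDu17/CompanionDoggy | plots/plot_one_user.py | _extract_middle_speeds
-- ===== SOURCE A (Python) =====
-- def _extract_middle_speeds(chunk_speeds, chunk_times, skip_start_secs, skip_end_secs):
--     """
--     Extract speeds from the middle portion of a chunk, skipping the specified
--     seconds at the beginning and end.
--     """
--     if not chunk_speeds or not chunk_times:
--         return []
--
--     # Find the start and end indices for the middle portion
--     cumulative_time = 0
--     start_idx = None
--     end_idx = None
--
--     # Find start index (after skip_start_secs)
--     for i, time_diff in enumerate(chunk_times):
--         cumulative_time += time_diff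
--         if cumulative_time >= skip_start_secs and start_idx is None:
--             start_idx = i
--         if cumulative_time >= (sum(chunk_times) - skip_end_secs) and end_idx is None:
--             end_idx = i
--             break
--
--     if start_idx is None or end_idx is None or start_idx >= end_idx:
--         return []
--
--     return chunk_speeds[start_idx:end_idx+1]
-- ===== SOURCE B (Python) =====
-- def _extract_middle_speeds(chunk_speeds, chunk_times, skip_start_secs, skip_end_secs):
--     """
--     Extract speeds from the middle portion of a chunk, skipping the specified
--     seconds at the beginning and end.
--     """
--     if not chunk_speeds or not chunk_times:
--         return []
--
--     # One pass builds the cumulative-time table (total = last entry),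
--     # then two independent first-occurrence scans pick the boundary indices.
--     cum = []
--     t = 0
--     for d in chunk_times:
--         t += d
--         cum.append(t)
--     total = cum[-1]
--
--     end_idx = next((i for i, c in enumerate(cum) if c >= total - skip_end_secs), None)
--     start_idx = next((i for i, c in enumerate(cum) if c >= skip_start_secs), None)
--
--     if start_idx is None or end_idx is None or start_idx >= end_idx:
--         return []
--     return chunk_speeds[start_idx:end_idx + 1]
-- ===== Notes on version B (the rewrite author's own statement) =====
-- stated objective: alternative
-- what changed: A's single interleaved pass tracks both sentinel indices while recomputing sum(chunk_times) on every iteration and breaking early; B builds the cumulative-sum table in one pass (total = its last entry) and then picks start and end indices with two independent first-occurrence scans over the table.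
import Mathlib
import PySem

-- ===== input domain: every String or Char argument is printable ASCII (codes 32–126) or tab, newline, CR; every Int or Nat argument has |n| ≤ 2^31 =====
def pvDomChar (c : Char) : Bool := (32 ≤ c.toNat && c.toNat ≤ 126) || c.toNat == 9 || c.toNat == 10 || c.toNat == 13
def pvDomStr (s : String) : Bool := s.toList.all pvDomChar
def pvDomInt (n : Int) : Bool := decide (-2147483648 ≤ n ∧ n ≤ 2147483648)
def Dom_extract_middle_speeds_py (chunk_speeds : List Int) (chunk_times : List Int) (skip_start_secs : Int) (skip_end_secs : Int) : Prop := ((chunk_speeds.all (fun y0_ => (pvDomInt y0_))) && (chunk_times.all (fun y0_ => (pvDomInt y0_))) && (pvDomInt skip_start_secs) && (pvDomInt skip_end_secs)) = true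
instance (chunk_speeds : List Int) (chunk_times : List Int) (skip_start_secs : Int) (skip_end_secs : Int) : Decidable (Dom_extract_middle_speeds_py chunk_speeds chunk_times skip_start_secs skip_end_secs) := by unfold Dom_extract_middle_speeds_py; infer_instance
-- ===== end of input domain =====

-- B replaces A's single interleaved sentinel-tracking pass (which re-sums chunk_times each
-- iteration) by one cumulative-sum pass followed by two independent first-occurrence scans.

-- ===== PORT A =====
-- the for-loop over enumerate(chunk_times): state = (cumulative_time, start_idx); `break` = return
def pvLoopA (ts : List Int) (ss es : Int) : List (Int × Int) → Int → Option Int → Option Int × Option Int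
  | [], _, start_idx => (start_idx, none)
  | (i, d) :: rest, cum0, start_idx0 =>
    let cum := cum0 + d
    let start_idx := if cum ≥ ss ∧ start_idx0 = none then some i else start_idx0
    if cum ≥ ts.sum - es then (start_idx, some i)
    else pvLoopA ts ss es rest cum start_idx

def extract_middle_speeds_py (chunk_speeds : List Int) (chunk_times : List Int) (skip_start_secs : Int) (skip_end_secs : Int) : List Int :=
  if chunk_speeds = [] ∨ chunk_times = [] then []
  else
    match pvLoopA chunk_times skip_start_secs skip_end_secs (PySem.List.enumerate chunk_times 0) 0 none with
    | (some s, some e) => if s ≥ e then [] else PySem.List.slice chunk_speeds (some s) (some (e + 1))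
    | (_, _) => []

-- ===== PORT B =====
-- the cum-building loop of Source B
def pvCum (t : Int) : List Int → List Int
  | [] => []
  | d :: r => (t + d) :: pvCum (t + d) r

-- next((i for i, c in enumerate(cum) if p c), None)
def pvFirstIdx (p : Int → Bool) (cum : List Int) : Option Int :=
  ((PySem.List.enumerate cum 0).find? (fun q => p q.2)).map Prod.fst

def extract_middle_speeds_py_alt (chunk_speeds : List Int) (chunk_times : List Int) (skip_start_secs : Int) (skip_end_secs : Int) : List Int :=
  if chunk_speeds = [] ∨ chunk_times = [] then []
  else
    let cum := pvCum 0 chunk_times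
    let total := (PySem.List.pyGet? cum (-1)).getD 0  -- cum[-1]; cum ≠ [] here, so pyGet? is some
    let end_idx := pvFirstIdx (fun c => c ≥ total - skip_end_secs) cum
    let start_idx := pvFirstIdx (fun c => c ≥ skip_start_secs) cum
    match start_idx with
    | none => []
    | some s =>
      match end_idx with
      | none => []
      | some e => if s ≥ e then [] else PySem.List.slice chunk_speeds (some s) (some (e + 1))

-- ===== PRECONDITION & SPEC =====
def Spec_extract_middle_speeds_py (chunk_speeds : List Int) (chunk_times : List Int) (skip_start_secs : Int) (skip_end_secs : Int) (out : List Int) : Prop := out = extract_middle_speeds_py_alt chunk_speeds chunk_times skip_start_secs skip_end_secs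
instance (chunk_speeds : List Int) (chunk_times : List Int) (skip_start_secs : Int) (skip_end_secs : Int) (out : List Int) : Decidable (Spec_extract_middle_speeds_py chunk_speeds chunk_times skip_start_secs skip_end_secs out) := by unfold Spec_extract_middle_speeds_py; infer_instance

-- ===== CLAIM (what is proved, stated in full; the proofs are below) =====
def Claim_equal_extract_middle_speeds_py : Prop := ∀ (chunk_speeds : List Int) (chunk_times : List Int) (skip_start_secs : Int) (skip_end_secs : Int), Dom_extract_middle_speeds_py chunk_speeds chunk_times skip_start_secs skip_end_secs → Spec_extract_middle_speeds_py chunk_speeds chunk_times skip_start_secs skip_end_secs (extract_middle_speeds_py chunk_speeds chunk_times skip_start_secs skip_end_secs)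

-- ===== LEMMAS AND PROOFS =====

-- proof-side first-match recursion over the raw times list with running index/cumulative sum
def pvFind (p : Int → Bool) : List Int → Int → Int → Option Int
  | [], _, _ => none
  | d :: r, k, c => if p (c + d) then some k else pvFind p r (k + 1) (c + d)

theorem pvFind_ge {p : Int → Bool} : ∀ (ts : List Int) (k c e : Int),
    pvFind p ts k c = some e → k ≤ e := by
  intro ts
  induction ts with
  | nil => intro k c e h; simp [pvFind] at h
  | cons d r ih =>
    intro k c e h
    simp only [pvFind] at h
    split at h
    · simp only [Option.some.injEq] at h; omega
    · have := ih (k + 1) (c + d) e h; omega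

theorem pvFirstIdx_cum {p : Int → Bool} : ∀ (ts : List Int) (k c : Int),
    ((PySem.List.enumerate (pvCum c ts) k).find? (fun q => p q.2)).map Prod.fst
      = pvFind p ts k c := by
  intro ts
  induction ts with
  | nil => intro k c; simp [pvCum, pvFind, PySem.List.enumerate_nil]
  | cons d r ih =>
    intro k c
    simp only [pvCum, pvFind, PySem.List.enumerate_cons, List.find?_cons]
    by_cases h : p (c + d) = true
    · simp [h]
    · simp only [h]
      simpa using ih (k + 1) (c + d)

theorem pvCum_getLast? : ∀ (ts : List Int) (t : Int), ts ≠ [] →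
    (pvCum t ts).getLast? = some (t + ts.sum) := by
  intro ts
  induction ts with
  | nil => intro t h; exact absurd rfl h
  | cons d r ih =>
    intro t _
    cases hr : r with
    | nil => simp [pvCum]
    | cons x xs =>
      subst hr
      have h2 : pvCum (t + d) (x :: xs) = (t + d + x) :: pvCum (t + d + x) xs := rfl
      rw [show pvCum t (d :: x :: xs) = (t + d) :: pvCum (t + d) (x :: xs) from rfl,
          h2, List.getLast?_cons_cons, ← h2, ih (t + d) (by simp)]
      simp only [List.sum_cons, Option.some.injEq]
      ring

-- A's loop once start_idx is set: it only searches for the end index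
theorem pvLoopA_some (ts : List Int) (ss es : Int) : ∀ (r : List Int) (k c s : Int),
    pvLoopA ts ss es (PySem.List.enumerate r k) c (some s)
      = (some s, pvFind (fun x => decide (x ≥ ts.sum - es)) r k c) := by
  intro r
  induction r with
  | nil => intro k c s; simp [pvLoopA, pvFind, PySem.List.enumerate_nil]
  | cons d rest ih =>
    intro k c s
    simp only [PySem.List.enumerate_cons, pvLoopA, pvFind]
    by_cases h : ts.sum - es ≤ c + d
    · simp [h]
    · simp [h, ih (k + 1) (c + d) s]

-- the main characterisation: A's interleaved pass = B's two independent first-occurrence scans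
theorem pvLoopA_none (ts : List Int) (ss es : Int) : ∀ (r : List Int) (k c : Int),
    pvLoopA ts ss es (PySem.List.enumerate r k) c none
      = (match pvFind (fun x => decide (x ≥ ss)) r k c, pvFind (fun x => decide (x ≥ ts.sum - es)) r k c with
         | some s, some e => (if s ≤ e then some s else none, some e)
         | some s, none => (some s, none)
         | none, eo => (none, eo)) := by
  intro r
  induction r with
  | nil => intro k c; simp [pvLoopA, pvFind, PySem.List.enumerate_nil]
  | cons d rest ih =>
    intro k c
    simp only [PySem.List.enumerate_cons, pvLoopA, pvFind]
    by_cases hs : ss ≤ c + d <;> by_cases he : ts.sum - es ≤ c + d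
    · simp [hs, he]
    · simp only [ge_iff_le, hs, he, decide_true, decide_false, and_true, if_true, if_false,
        Bool.false_eq_true, pvLoopA_some ts ss es rest (k + 1) (c + d) k]
      cases hE : pvFind (fun x => decide (x ≥ ts.sum - es)) rest (k + 1) (c + d) with
      | none => simp
      | some e =>
        have := pvFind_ge rest (k + 1) (c + d) e hE
        simp [show k ≤ e by omega]
    · simp only [ge_iff_le, hs, he, decide_true, decide_false, and_true, if_true, if_false,
        Bool.false_eq_true]
      cases hS : pvFind (fun x => decide (x ≥ ss)) rest (k + 1) (c + d) with
      | none => simp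
      | some s =>
        have := pvFind_ge rest (k + 1) (c + d) s hS
        simp [show ¬ s ≤ k by omega]
    · simp only [ge_iff_le, hs, he, decide_false, and_true, if_false, Bool.false_eq_true]
      exact ih (k + 1) (c + d)

-- ===== VERDICT (by name: the statement is the Claim_ definition above) =====
theorem extract_middle_speeds_py_spec : Claim_equal_extract_middle_speeds_py := by
  intro cs ts ss es _
  unfold Spec_extract_middle_speeds_py extract_middle_speeds_py extract_middle_speeds_py_alt
  by_cases h : cs = [] ∨ ts = []
  · simp [h]
  · simp only [if_neg h]
    have hts : ts ≠ [] := fun hh => h (Or.inr hh)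
    have htot : (PySem.List.pyGet? (pvCum 0 ts) (-1)).getD 0 = ts.sum := by
      rw [PySem.List.pyGet?_neg_one, pvCum_getLast? ts 0 hts]
      simp
    rw [htot]
    simp only [pvFirstIdx]
    rw [pvFirstIdx_cum (p := fun c => decide (c ≥ ss)) ts 0 0,
        pvFirstIdx_cum (p := fun c => decide (c ≥ ts.sum - es)) ts 0 0,
        pvLoopA_none ts ss es ts 0 0]
    cases hS : pvFind (fun x => decide (x ≥ ss)) ts 0 0 with
    | none => cases hE : pvFind (fun x => decide (x ≥ ts.sum - es)) ts 0 0 <;> simp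
    | some s =>
      cases hE : pvFind (fun x => decide (x ≥ ts.sum - es)) ts 0 0 with
      | none => simp
      | some e =>
        by_cases hle : s ≤ e
        · simp only [if_pos hle]
        · simp only [if_neg hle]
          have : e ≤ s := by omega
          simp [this]
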